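-- pv_equiv track=rewrite | github.com/liutongling/DP | Problem.py | numberOfPaths
-- ===== SOURCE A (Python) =====
-- def numberOfPaths(grid: list, k: int) -> int:
--     for i in range(len(grid)):
--         for j in range(len(grid[0])):
--             grid[i][j] = grid[i][j] % k
--
--     def dfs(i,j,pre):
--         if i<0 or j<0:
--             return 0
--         pre = (grid[i][j]+pre)%k
--         if i==0 and j==0:
--             return 1 if pre==0 else 0
--         return (dfs(i-1,j,pre) + dfs(i,j-1,pre))%(10**9+7)
--     return dfs(len(grid)-1,len(grid[0])-1,0)
-- ===== SOURCE B (Python) =====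
-- def numberOfPaths(grid: list, k: int) -> int:
--     # Iterative DP over (row, col, remainder) instead of A's exponential DFS.
--     # Note: A mutates grid in place (reduces entries mod k); B does not.
--     MOD = 10 ** 9 + 7
--     m, n = len(grid), len(grid[0])
--     if n == 0:
--         return 0
--     prev = []
--     for i in range(m):
--         cur = []
--         for j in range(n):
--             r = grid[i][j] % k
--             if i == 0 and j == 0:
--                 counts = {r: 1}
--             else:
--                 up = prev[j] if i > 0 else {}
--                 left = cur[j - 1] if j > 0 else {}
--                 counts = {}
--                 for rem in list(up) + list(left):
--                     t = (rem + r) % k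
--                     counts[t] = (up.get((t - r) % k, 0) + left.get((t - r) % k, 0)) % MOD
--             cur.append(counts)
--         prev = cur
--     return prev[n - 1].get(0, 0)
-- ===== Notes on version B (the rewrite author's own statement) =====
-- stated objective: faster
-- what changed: Replaced the exponential top-down DFS over all monotone paths by an iterative row-by-row DP keeping, per cell, a dictionary from path-sum remainder mod k to path count mod 1e9+7; intended as asymptotically faster (a timing run measured 2.86x at the largest size where A still finished, and A timed out at n=256 where B returned).
import Mathlib
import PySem

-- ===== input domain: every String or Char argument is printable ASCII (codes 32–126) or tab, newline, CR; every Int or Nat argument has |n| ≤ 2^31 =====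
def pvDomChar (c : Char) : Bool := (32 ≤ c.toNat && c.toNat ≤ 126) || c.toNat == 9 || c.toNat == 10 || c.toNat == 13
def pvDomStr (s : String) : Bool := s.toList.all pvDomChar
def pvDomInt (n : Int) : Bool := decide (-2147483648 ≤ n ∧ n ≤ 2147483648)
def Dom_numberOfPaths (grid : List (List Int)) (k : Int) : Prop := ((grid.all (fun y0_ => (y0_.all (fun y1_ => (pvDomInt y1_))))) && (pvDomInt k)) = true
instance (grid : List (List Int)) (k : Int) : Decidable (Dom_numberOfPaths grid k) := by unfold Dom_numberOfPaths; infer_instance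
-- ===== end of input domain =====

-- B replaces A's exponential DFS by an iterative remainder-DP; A mutates `grid` in place
-- (reduces its entries mod k) while B does not — the equivalence proved here is about the
-- return value only.

-- ===== PORT A =====
-- the in-place mutation loop: grid[i][j] = grid[i][j] % k for j < len(grid[0])
def pvModGrid (grid : List (List Int)) (k : Int) : List (List Int) :=
  let n := (grid.headD []).length
  grid.map (fun row => row.mapIdx (fun j x => if j < n then PySem.Int.mod x k else x))

def pvDfs (g : List (List Int)) (k : Int) (i j pre : Int) : Int :=
  if i < 0 ∨ j < 0 then 0
  else
    let pre' := PySem.Int.mod (PySem.List.pyGetD (PySem.List.pyGetD g i []) j 0 + pre) k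
    if i = 0 ∧ j = 0 then (if pre' = 0 then 1 else 0)
    else PySem.Int.mod (pvDfs g k (i-1) j pre' + pvDfs g k i (j-1) pre') (10^9+7)
termination_by (i + j).toNat
decreasing_by all_goals omega

def numberOfPaths (grid : List (List Int)) (k : Int) : Int :=
  let g := pvModGrid grid k
  pvDfs g k ((grid.length : Int) - 1) (((grid.headD []).length : Int) - 1) 0

-- ===== PORT B =====
-- one cell of the DP: merge the shifted remainder dictionaries of the upper and left cell
def pvCell (k MOD r : Int) (up left : PySem.Dict Int Int) : PySem.Dict Int Int :=
  (up.keys ++ left.keys).foldl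
    (fun c rem =>
      let t := PySem.Int.mod (rem + r) k
      c.insert t (PySem.Int.mod
        (PySem.Dict.getD up (PySem.Int.mod (t - r) k) 0
          + PySem.Dict.getD left (PySem.Int.mod (t - r) k) 0) MOD))
    PySem.Dict.empty

def pvCellAt (grid : List (List Int)) (k MOD : Int)
    (prev cur : List (PySem.Dict Int Int)) (i j : Int) : PySem.Dict Int Int :=
  let r := PySem.Int.mod (PySem.List.pyGetD (PySem.List.pyGetD grid i []) j 0) k
  if i = 0 ∧ j = 0 then PySem.Dict.empty.insert r 1
  else
    let up := if 0 < i then PySem.List.pyGetD prev j PySem.Dict.empty else PySem.Dict.empty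
    let left := if 0 < j then PySem.List.pyGetD cur (j-1) PySem.Dict.empty else PySem.Dict.empty
    pvCell k MOD r up left

def pvRow (grid : List (List Int)) (k MOD : Int) (n : Int)
    (prev : List (PySem.Dict Int Int)) (i : Int) : List (PySem.Dict Int Int) :=
  (PySem.List.pyRange 0 n 1).foldl (fun cur j => cur ++ [pvCellAt grid k MOD prev cur i j]) []

def numberOfPaths_alt (grid : List (List Int)) (k : Int) : Int :=
  let MOD : Int := 10^9+7
  let m := grid.length
  let n := (grid.headD []).length
  if n = 0 then 0
  else
    let prev := (PySem.List.pyRange 0 (m : Int) 1).foldl (pvRow grid k MOD (n : Int)) []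
    PySem.Dict.getD (PySem.List.pyGetD prev ((n : Int) - 1) PySem.Dict.empty) 0 0

-- ===== PRECONDITION & SPEC =====
-- exactly the inputs where Python A returns: grid nonempty, and (unless row 0 is empty,
-- where A returns before touching anything) k ≠ 0 (else ZeroDivisionError) and every row
-- at least as long as row 0 (else IndexError in the mutation loop)
def Pre_numberOfPaths (grid : List (List Int)) (k : Int) : Prop :=
  grid ≠ [] ∧ ((grid.headD []).length = 0 ∨
    (k ≠ 0 ∧ ∀ row ∈ grid, (grid.headD []).length ≤ row.length))
instance (grid : List (List Int)) (k : Int) : Decidable (Pre_numberOfPaths grid k) := by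
  unfold Pre_numberOfPaths; infer_instance

def pvWitness_numberOfPaths : List (List Int) × Int := ([[1, 2], [3, 4]], 3)

def Spec_numberOfPaths (grid : List (List Int)) (k : Int) (out : Int) : Prop := out = numberOfPaths_alt grid k
instance (grid : List (List Int)) (k : Int) (out : Int) : Decidable (Spec_numberOfPaths grid k out) := by unfold Spec_numberOfPaths; infer_instance

-- ===== CLAIM (what is proved, stated in full; the proofs are below) =====
def Claim_equal_numberOfPaths : Prop := ∀ (grid : List (List Int)) (k : Int), Dom_numberOfPaths grid k → Pre_numberOfPaths grid k → Spec_numberOfPaths grid k (numberOfPaths grid k)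

-- ===== LEMMAS AND PROOFS =====

-- PySem.Int.mod is Python's floor mod = Int.fmod; congruence toolkit
theorem pvMod_eq_fmod (a b : Int) : PySem.Int.mod a b = Int.fmod a b := by
  simp [PySem.Int.mod, Int.fmod_eq_emod]

theorem pvMod_congr {k a b : Int} (h : a % k = b % k) :
    PySem.Int.mod a k = PySem.Int.mod b k := by
  have hd : (k ∣ a) ↔ (k ∣ b) := by
    constructor <;> intro hx <;>
      [exact Int.dvd_of_emod_eq_zero (h ▸ Int.emod_eq_zero_of_dvd hx);
       exact Int.dvd_of_emod_eq_zero (h.symm ▸ Int.emod_eq_zero_of_dvd hx)]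
  simp [pvMod_eq_fmod, Int.fmod_eq_emod, h, hd]

theorem pvMod_emod (a k : Int) : (PySem.Int.mod a k) % k = a % k := by
  rw [pvMod_eq_fmod, Int.fmod_eq_emod]
  split <;> simp [Int.emod_emod_of_dvd _ dvd_rfl]

theorem pvMod_mod (a k : Int) : PySem.Int.mod (PySem.Int.mod a k) k = PySem.Int.mod a k :=
  pvMod_congr (pvMod_emod a k)

theorem pvMod_add_left (a b k : Int) :
    PySem.Int.mod (PySem.Int.mod a k + b) k = PySem.Int.mod (a + b) k :=
  pvMod_congr (by rw [Int.add_emod, pvMod_emod, ← Int.add_emod])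

theorem pvMod_neg_mod (a k : Int) :
    PySem.Int.mod (-(PySem.Int.mod a k)) k = PySem.Int.mod (-a) k :=
  pvMod_congr (Int.ModEq.neg (pvMod_emod a k))

theorem pvMod_zero_left (k : Int) : PySem.Int.mod 0 k = 0 := by
  simp [pvMod_eq_fmod]

-- the per-pre relation between a DP cell dictionary and A's dfs at (i, j)
def pvRel (g : List (List Int)) (k : Int) (i j : Int) (d : PySem.Dict Int Int) : Prop :=
  ∀ pre : Int, PySem.Dict.getD d (PySem.Int.mod (-pre) k) 0 = pvDfs g k i j pre

theorem pvDfs_neg (g : List (List Int)) (k : Int) {i j : Int} (h : i < 0 ∨ j < 0) (pre : Int) :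
    pvDfs g k i j pre = 0 := by
  rw [pvDfs]; simp [h]

theorem pvRel_empty_row (g : List (List Int)) (k : Int) (j : Int) :
    pvRel g k (-1) j PySem.Dict.empty := by
  intro pre; rw [pvDfs_neg g k (Or.inl (by omega))]; rfl

theorem pvRel_empty_col (g : List (List Int)) (k : Int) (i : Int) :
    pvRel g k i (-1) PySem.Dict.empty := by
  intro pre; rw [pvDfs_neg g k (Or.inr (by omega))]; rfl

-- the fold building one cell, characterised pointwise
theorem pvFold_getD (k MOD r : Int) (up left : PySem.Dict Int Int)
    (l : List Int) (c : PySem.Dict Int Int) (t : Int) :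
    PySem.Dict.getD
      (l.foldl (fun c rem =>
        let t := PySem.Int.mod (rem + r) k
        c.insert t (PySem.Int.mod
          (PySem.Dict.getD up (PySem.Int.mod (t - r) k) 0
            + PySem.Dict.getD left (PySem.Int.mod (t - r) k) 0) MOD)) c) t 0 =
      if ∃ rem ∈ l, PySem.Int.mod (rem + r) k = t then
        PySem.Int.mod
          (PySem.Dict.getD up (PySem.Int.mod (t - r) k) 0
            + PySem.Dict.getD left (PySem.Int.mod (t - r) k) 0) MOD
      else PySem.Dict.getD c t 0 := by
  induction l generalizing c with
  | nil => simp
  | cons a l ih =>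
    simp only [List.foldl_cons, ih, List.mem_cons]
    rw [PySem.Dict.getD_insert]
    by_cases hat : PySem.Int.mod (a + r) k = t
    · by_cases hl : ∃ rem ∈ l, PySem.Int.mod (rem + r) k = t
      · simp [hl, hat]
      · simp [hl, hat]
    · by_cases hl : ∃ rem ∈ l, PySem.Int.mod (rem + r) k = t
      · simp [hl, hat]
      · simp [hl, hat, Ne.symm hat]

theorem pvCell_getD (k MOD r : Int) (up left : PySem.Dict Int Int) (t : Int) :
    PySem.Dict.getD (pvCell k MOD r up left) t 0 =
      if ∃ rem ∈ up.keys ++ left.keys, PySem.Int.mod (rem + r) k = t then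
        PySem.Int.mod
          (PySem.Dict.getD up (PySem.Int.mod (t - r) k) 0
            + PySem.Dict.getD left (PySem.Int.mod (t - r) k) 0) MOD
      else 0 := by
  rw [pvCell, pvFold_getD]
  rfl

-- a key whose getD is nonzero is present
theorem pvMem_keys_of_getD_ne (d : PySem.Dict Int Int) (t : Int)
    (h : PySem.Dict.getD d t 0 ≠ 0) : t ∈ d.keys := by
  by_contra hm
  exact h (PySem.Dict.getD_of_not_contains d 0
    (by rw [PySem.Dict.contains_eq_decide_mem_keys]; simpa using hm))

-- base cell (0,0)
theorem pvRel_base (g : List (List Int)) (k r : Int)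
    (hr : PySem.List.pyGetD (PySem.List.pyGetD g 0 []) 0 0 = r)
    (hrc : PySem.Int.mod r k = r) :
    pvRel g k 0 0 (PySem.Dict.empty.insert r 1) := by
  intro pre
  rw [pvDfs]
  simp only [show ¬((0 : Int) < 0 ∨ (0 : Int) < 0) by omega, hr, ite_false]
  rw [PySem.Dict.getD_insert]
  by_cases hc : PySem.Int.mod (r + pre) k = 0
  · have hdvd : k ∣ (r + pre) := (PySem.Int.mod_eq_zero_iff_dvd _ _).mp hc
    have : PySem.Int.mod (-pre) k = r := by
      have hcong : Int.ModEq k (-pre) r :=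
        Int.modEq_iff_dvd.mpr (by rw [Int.sub_neg]; exact hdvd)
      rw [pvMod_congr hcong, hrc]
    simp [this, hc]
  · have : PySem.Int.mod (-pre) k ≠ r := by
      intro he
      apply hc
      have : PySem.Int.mod (PySem.Int.mod (-pre) k + pre) k = 0 := by
        rw [pvMod_add_left]; simpa using pvMod_zero_left k
      rw [he] at this; exact this
    simp [this, hc]

-- inductive cell step
theorem pvRel_step (g : List (List Int)) (k MOD : Int) (i j : Int)
    (hi : 0 ≤ i) (hj : 0 ≤ j) (hnz : ¬ (i = 0 ∧ j = 0)) (hMOD : MOD = 10^9+7)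
    (r : Int) (hr : PySem.List.pyGetD (PySem.List.pyGetD g i []) j 0 = r)
    (up left : PySem.Dict Int Int)
    (hup : pvRel g k (i-1) j up) (hleft : pvRel g k i (j-1) left) :
    pvRel g k i j (pvCell k MOD r up left) := by
  intro pre
  set t := PySem.Int.mod (-pre) k with ht
  set pre' := PySem.Int.mod (r + pre) k with hpre'
  have hq : PySem.Int.mod (t - r) k = PySem.Int.mod (-pre') k := by
    rw [ht, hpre', pvMod_neg_mod]
    have h1 : PySem.Int.mod (-pre) k - r = PySem.Int.mod (-pre) k + (-r) := by ring
    rw [h1, pvMod_add_left]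
    exact pvMod_congr (by ring_nf)
  have hdfs : pvDfs g k i j pre =
      PySem.Int.mod (pvDfs g k (i-1) j pre' + pvDfs g k i (j-1) pre') (10^9+7) := by
    rw [pvDfs]
    simp only [show ¬(i < 0 ∨ j < 0) by omega, hnz, hr, hpre', ite_false]
  rw [hdfs, pvCell_getD, hMOD]
  by_cases hex : ∃ rem ∈ up.keys ++ left.keys, PySem.Int.mod (rem + r) k = t
  · rw [if_pos hex, hq, hup pre', hleft pre']
  · rw [if_neg hex]
    have hup0 : PySem.Dict.getD up (PySem.Int.mod (t - r) k) 0 = 0 := by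
      by_contra h0
      exact hex ⟨PySem.Int.mod (t - r) k,
        List.mem_append_left _ (pvMem_keys_of_getD_ne _ _ h0),
        by rw [pvMod_add_left]; simpa [ht] using pvMod_mod (-pre) k⟩
    have hleft0 : PySem.Dict.getD left (PySem.Int.mod (t - r) k) 0 = 0 := by
      by_contra h0
      exact hex ⟨PySem.Int.mod (t - r) k,
        List.mem_append_right _ (pvMem_keys_of_getD_ne _ _ h0),
        by rw [pvMod_add_left]; simpa [ht] using pvMod_mod (-pre) k⟩
    rw [hq] at hup0 hleft0
    rw [← hup pre', ← hleft pre', hup0, hleft0]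
    simp

-- access into the modded grid
theorem pvModGrid_get (grid : List (List Int)) (k : Int)
    (hrows : ∀ row ∈ grid, (grid.headD []).length ≤ row.length)
    (i j : Nat) (hi : i < grid.length) (hj : j < (grid.headD []).length) :
    PySem.List.pyGetD (PySem.List.pyGetD (pvModGrid grid k) (i:Int) []) (j:Int) 0
      = PySem.Int.mod (PySem.List.pyGetD (PySem.List.pyGetD grid (i:Int) []) (j:Int) 0) k := by
  have hrow : j < grid[i].length := lt_of_lt_of_le hj (hrows _ (List.getElem_mem hi))
  rw [pvModGrid]
  simp [List.getD, hi, hrow, List.getElem_mapIdx]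
  intro hle
  have : (grid.headD []).length ≤ j := by simpa using hle
  omega

-- one whole DP row in relation with dfs on that row
def pvRowRel (grid : List (List Int)) (k : Int) (iInt : Int)
    (row : List (PySem.Dict Int Int)) : Prop :=
  row.length = (grid.headD []).length ∧
  ∀ jn : Nat, jn < (grid.headD []).length →
    pvRel (pvModGrid grid k) k iInt (jn : Int) (row.getD jn PySem.Dict.empty)

-- the inner (column) loop invariant
theorem pvRow_inner (grid : List (List Int)) (k : Int)
    (hrows : ∀ row ∈ grid, (grid.headD []).length ≤ row.length)
    (i : Nat) (hi : i < grid.length)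
    (prev : List (PySem.Dict Int Int))
    (hprev : 0 < i → pvRowRel grid k ((i:Int)-1) prev)
    (nj : Nat) (hnj : nj ≤ (grid.headD []).length) :
    ((PySem.List.pyRange 0 (nj:Int) 1).foldl
        (fun cur j => cur ++ [pvCellAt grid k (10^9+7) prev cur (i:Int) j]) []).length = nj ∧
    ∀ j' : Nat, j' < nj →
      pvRel (pvModGrid grid k) k (i:Int) (j':Int)
        (((PySem.List.pyRange 0 (nj:Int) 1).foldl
          (fun cur j => cur ++ [pvCellAt grid k (10^9+7) prev cur (i:Int) j]) []).getD j' PySem.Dict.empty) := by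
  induction nj with
  | zero => simp [PySem.List.pyRange_one_eq_nil]
  | succ nj ih =>
    have hnj' : nj ≤ (grid.headD []).length := by omega
    obtain ⟨ihlen, ihrel⟩ := ih hnj'
    have hsplit : PySem.List.pyRange 0 ((nj+1 : Nat) : Int) 1 =
        PySem.List.pyRange 0 (nj : Int) 1 ++ [(nj : Int)] := by
      push_cast
      exact PySem.List.pyRange_one_succ_right (by omega)
    set cur := (PySem.List.pyRange 0 (nj:Int) 1).foldl
        (fun cur j => cur ++ [pvCellAt grid k (10^9+7) prev cur (i:Int) j]) [] with hcur
    have hfold : (PySem.List.pyRange 0 ((nj+1 : Nat):Int) 1).foldl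
        (fun cur j => cur ++ [pvCellAt grid k (10^9+7) prev cur (i:Int) j]) []
        = cur ++ [pvCellAt grid k (10^9+7) prev cur (i:Int) (nj:Int)] := by
      rw [hsplit, List.foldl_append, List.foldl_cons, List.foldl_nil, ← hcur]
    rw [hfold]
    constructor
    · simp [ihlen]
    · intro j' hj'
      by_cases hlt : j' < nj
      · have hlt' : j' < cur.length := by omega
        have : (cur ++ [pvCellAt grid k (10^9+7) prev cur (i:Int) (nj:Int)]).getD j' PySem.Dict.empty
            = cur.getD j' PySem.Dict.empty := by
          simp [List.getD, List.getElem?_append_left hlt']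
        rw [this]
        exact ihrel j' hlt
      · have hj'e : j' = nj := by omega
        subst hj'e
        have hlen' : j' = cur.length := by omega
        have hgd : (cur ++ [pvCellAt grid k (10^9+7) prev cur (i:Int) (j':Int)]).getD j' PySem.Dict.empty
            = pvCellAt grid k (10^9+7) prev cur (i:Int) (j':Int) := by
          rw [List.getD, hlen', List.getElem?_concat_length]
          rfl
        rw [hgd]
        -- now establish the relation for the fresh cell
        have hjn : j' < (grid.headD []).length := by omega
        have hr : PySem.List.pyGetD (PySem.List.pyGetD (pvModGrid grid k) (i:Int) []) (j':Int) 0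
            = PySem.Int.mod (PySem.List.pyGetD (PySem.List.pyGetD grid (i:Int) []) (j':Int) 0) k :=
          pvModGrid_get grid k hrows i j' hi hjn
        rw [pvCellAt]
        by_cases hbase : (i:Int) = 0 ∧ (j':Int) = 0
        · rw [if_pos hbase]
          obtain ⟨hi0, hj0⟩ := hbase
          rw [show (i:Int) = 0 from hi0, show (j':Int) = 0 from hj0] at hr ⊢
          exact pvRel_base _ k _ hr (pvMod_mod _ k)
        · rw [if_neg hbase]
          apply pvRel_step _ k _ _ _ (by positivity) (by positivity) hbase rfl _ hr
          · -- up
            by_cases hi0 : (0:Int) < (i:Int)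
            · rw [if_pos hi0]
              have hip : 0 < i := by exact_mod_cast hi0
              obtain ⟨hplen, hprel⟩ := hprev hip
              have : PySem.List.pyGetD prev (j':Int) PySem.Dict.empty = prev.getD j' PySem.Dict.empty := by
                simp [PySem.List.pyGetD_natCast]
              rw [this]
              exact hprel j' hjn
            · rw [if_neg hi0]
              have : (i:Int) - 1 = -1 := by omega
              rw [this]
              exact pvRel_empty_row _ k _
          · -- left
            by_cases hj0 : (0:Int) < (j':Int)
            · rw [if_pos hj0]
              have hjp : 0 < j' := by exact_mod_cast hj0
              have hcast : (j':Int) - 1 = ((j'-1 : Nat) : Int) := by omega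
              have : PySem.List.pyGetD cur ((j':Int)-1) PySem.Dict.empty = cur.getD (j'-1) PySem.Dict.empty := by
                rw [hcast]; simp [PySem.List.pyGetD_natCast]
              rw [this, hcast]
              exact ihrel (j'-1) (by omega)
            · rw [if_neg hj0]
              have : (j':Int) - 1 = -1 := by omega
              rw [this]
              exact pvRel_empty_col _ k _

-- the outer (row) loop invariant
theorem pvRow_outer (grid : List (List Int)) (k : Int)
    (hrows : ∀ row ∈ grid, (grid.headD []).length ≤ row.length)
    (mi : Nat) (hmi : mi ≤ grid.length) (h0 : 0 < mi) :
    pvRowRel grid k ((mi:Int)-1)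
      ((PySem.List.pyRange 0 (mi:Int) 1).foldl
        (pvRow grid k (10^9+7) ((grid.headD []).length : Int)) []) := by
  induction mi with
  | zero => omega
  | succ mi ih =>
    have hsplit : PySem.List.pyRange 0 ((mi+1 : Nat) : Int) 1 =
        PySem.List.pyRange 0 (mi : Int) 1 ++ [(mi : Int)] := by
      push_cast
      exact PySem.List.pyRange_one_succ_right (by omega)
    rw [hsplit, List.foldl_append]
    set prev := (PySem.List.pyRange 0 (mi:Int) 1).foldl
        (pvRow grid k (10^9+7) ((grid.headD []).length : Int)) [] with hprevdef
    have hstep : List.foldl (pvRow grid k (10^9+7) ((grid.headD []).length : Int)) prev [(mi:Int)]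
        = pvRow grid k (10^9+7) ((grid.headD []).length : Int) prev (mi:Int) := by
      simp
    rw [hstep, pvRow]
    have hmi' : mi < grid.length := by omega
    have hinner := pvRow_inner grid k hrows mi hmi' prev
      (fun hp => ih (by omega) hp) (grid.headD []).length (le_refl _)
    constructor
    · exact hinner.1
    · intro jn hjn
      have : ((mi+1 : Nat) : Int) - 1 = (mi : Int) := by push_cast; ring
      rw [this]
      exact hinner.2 jn hjn

-- ===== VERDICT (by name: the statement is the Claim_ definition above) =====
theorem numberOfPaths_spec : Claim_equal_numberOfPaths := by
  intro grid k hdom hpre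
  obtain ⟨hne, hcase⟩ := hpre
  unfold Spec_numberOfPaths numberOfPaths numberOfPaths_alt
  by_cases hn : (grid.headD []).length = 0
  · rw [if_pos hn]
    have : ((grid.headD []).length : Int) - 1 = -1 := by omega
    rw [this]
    exact pvDfs_neg _ k (Or.inr (by omega)) 0
  · rw [if_neg hn]
    obtain ⟨hk, hrows⟩ := hcase.resolve_left hn
    show pvDfs (pvModGrid grid k) k ((grid.length : Int) - 1) (((grid.headD []).length : Int) - 1) 0
      = PySem.Dict.getD (PySem.List.pyGetD
          ((PySem.List.pyRange 0 (grid.length : Int) 1).foldl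
            (pvRow grid k (10^9+7) ((grid.headD []).length : Int)) [])
          ((grid.headD []).length - 1 : Int) PySem.Dict.empty) 0 0
    have hm : 0 < grid.length := List.length_pos_iff.mpr hne
    have houter := pvRow_outer grid k hrows grid.length (le_refl _) hm
    obtain ⟨hplen, hprel⟩ := houter
    have hcast : ((grid.headD []).length : Int) - 1 = (((grid.headD []).length - 1 : Nat) : Int) := by omega
    rw [hcast]
    have hgd : PySem.List.pyGetD
        ((PySem.List.pyRange 0 (grid.length:Int) 1).foldl
          (pvRow grid k (10^9+7) ((grid.headD []).length : Int)) [])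
        (((grid.headD []).length - 1 : Nat) : Int) PySem.Dict.empty
        = ((PySem.List.pyRange 0 (grid.length:Int) 1).foldl
          (pvRow grid k (10^9+7) ((grid.headD []).length : Int)) []).getD ((grid.headD []).length - 1) PySem.Dict.empty := by
      simp [PySem.List.pyGetD_natCast]
    rw [hgd]
    have hrel := hprel ((grid.headD []).length - 1) (by omega)
    have := hrel 0
    rw [neg_zero, pvMod_zero_left] at this
    rw [← this]
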